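-- pv_equiv track=rewrite | github.com/hidenobi/PythonPTIT | LietKeSoDep.py | isBeautifulNumber
-- ===== SOURCE A (Python) =====
-- def isBeautifulNumber(n):
--     n = str(n)
--     x = n
--     x = x[::-1]
--     if (x!=n): return False
--     if(len(n)%2==1): return False
--     for i in n:
--         if (i!='0' and i!='2' and i!='4' and i!='6' and i!='8'): return False
--     return True
-- ===== SOURCE B (Python) =====
-- def isBeautifulNumber(n):
--     if n < 0:
--         return False
--     digs = []
--     m = n
--     while True:
--         m, d = divmod(m, 10)
--         digs.append(d)
--         if m == 0:
--             break
--     return len(digs) % 2 == 0 and digs == digs[::-1] and all(d % 2 == 0 for d in digs)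
-- ===== Notes on version B (the rewrite author's own statement) =====
-- stated objective: alternative
-- what changed: A converts to a string, reverses and compares the whole string, then scans its characters; B never builds a string: a divmod loop extracts the digits as integers (negatives rejected up front) and the palindrome / even-length / all-even checks run on that list of ints.
import Mathlib
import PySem

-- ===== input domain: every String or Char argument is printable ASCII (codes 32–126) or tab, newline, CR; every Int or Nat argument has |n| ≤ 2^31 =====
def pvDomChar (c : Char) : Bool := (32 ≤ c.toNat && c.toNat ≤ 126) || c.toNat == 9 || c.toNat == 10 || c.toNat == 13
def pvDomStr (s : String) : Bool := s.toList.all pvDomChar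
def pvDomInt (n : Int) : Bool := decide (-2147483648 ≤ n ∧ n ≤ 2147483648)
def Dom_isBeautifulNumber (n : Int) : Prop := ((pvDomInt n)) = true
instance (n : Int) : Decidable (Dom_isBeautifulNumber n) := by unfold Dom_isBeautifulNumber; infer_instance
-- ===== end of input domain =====

-- B replaces A's string algorithm (str(n), whole-string reversal and compare, digit-character scan)
-- by pure integer arithmetic: a divmod loop extracts the digits as numbers, then the checks run on
-- that list of ints; no string is ever built. Same values; no speed claim.

-- ===== PORT A =====
-- the for-loop over the digit characters with early 'return False'
def pvLoopA : List Char → Bool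
  | [] => true
  | c :: r => if (!(c == '0') && !(c == '2') && !(c == '4') && !(c == '6') && !(c == '8')) then false else pvLoopA r

def isBeautifulNumber (n : Int) : Bool :=
  let s := PySem.Int.toChars n               -- n = str(n)
  let x := (PySem.List.slice? s none none (-1)).getD []   -- x = x[::-1]; step -1 ≠ 0, never none
  if x ≠ s then false
  else if s.length % 2 == 1 then false
  else pvLoopA s

-- ===== PORT B =====
-- the do-while divmod loop building digs (low digit first); it runs only on m = n.toNat with
-- 0 ≤ n, where Python's divmod(m, 10) is exactly Nat division/remainder
def pvDigitsB (m : Nat) : List Int :=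
  let q := m / 10
  let d := (m % 10 : Int)
  if _h : q = 0 then [d] else d :: pvDigitsB q
termination_by m
decreasing_by exact Nat.div_lt_self (by omega) (by omega)

def isBeautifulNumber_alt (n : Int) : Bool :=
  if n < 0 then false
  else
    let digs := pvDigitsB n.toNat
    -- len(digs) % 2 == 0 and digs == digs[::-1] and all(d % 2 == 0 for d in digs)
    -- (digs[::-1] is .reverse; d % 2 on the nonnegative d with positive divisor 2 is Lean's %)
    (digs.length % 2 == 0) && (digs == digs.reverse) && digs.all (fun d => d % 2 == 0)

-- ===== PRECONDITION & SPEC =====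
def Spec_isBeautifulNumber (n : Int) (out : Bool) : Prop := out = isBeautifulNumber_alt n
instance (n : Int) (out : Bool) : Decidable (Spec_isBeautifulNumber n out) := by unfold Spec_isBeautifulNumber; infer_instance

-- ===== CLAIM (what is proved, stated in full; the proofs are below) =====
def Claim_equal_isBeautifulNumber : Prop := ∀ (n : Int), Dom_isBeautifulNumber n → Spec_isBeautifulNumber n (isBeautifulNumber n)

-- ===== LEMMAS AND PROOFS =====

-- proof-side helpers: the little-endian digit list over Nat, and the Nat→Int map
def natDigs (m : Nat) : List Nat :=
  if h : m / 10 = 0 then [m % 10] else m % 10 :: natDigs (m / 10)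
termination_by m
decreasing_by exact Nat.div_lt_self (by omega) (by omega)

def mapI : List Nat → List Int
  | [] => []
  | a :: r => Int.ofNat a :: mapI r

lemma mapI_eq (l : List Nat) : mapI l = l.map Int.ofNat := by
  induction l <;> simp [mapI, *]

lemma pvDigitsB_eq (m : Nat) : pvDigitsB m = mapI (natDigs m) := by
  induction m using Nat.strong_induction_on with
  | _ m ih =>
    rw [pvDigitsB, natDigs]
    by_cases h : m / 10 = 0
    · simp only [h, dif_pos]; rfl
    · rw [dif_neg h, dif_neg h, ih _ (Nat.div_lt_self (by omega) (by omega))]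
      rfl

lemma natDigs_ne_nil (m : Nat) : natDigs m ≠ [] := by
  rw [natDigs]; split <;> simp

lemma natDigs_lt10 (m : Nat) : ∀ d ∈ natDigs m, d < 10 := by
  induction m using Nat.strong_induction_on with
  | _ m ih =>
    rw [natDigs]
    split
    · simp; omega
    · intro d hd
      rcases List.mem_cons.mp hd with h | h
      · omega
      · exact ih _ (Nat.div_lt_self (by omega) (by omega)) d h

-- Nat.toDigitsCore characterised by natDigs (any fuel f > m suffices)
lemma tdc_eq (m : Nat) : ∀ f (ds : List Char), m < f →
    Nat.toDigitsCore 10 f m ds = ((natDigs m).map Nat.digitChar).reverse ++ ds := by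
  induction m using Nat.strong_induction_on with
  | _ m ih =>
    intro f ds hf
    match f with
    | f + 1 =>
      rw [Nat.toDigitsCore, natDigs]
      by_cases h : m / 10 = 0
      · simp [h]
      · rw [if_neg h, dif_neg h,
          ih _ (Nat.div_lt_self (by omega) (by omega)) f _ (by
            have := Nat.div_lt_self (show 0 < m by omega) (show 1 < 10 by omega); omega)]
        simp

lemma toDigits_eq (m : Nat) :
    Nat.toDigits 10 m = ((natDigs m).map Nat.digitChar).reverse := by
  rw [Nat.toDigits, tdc_eq m (m + 1) [] (by omega)]; simp

lemma digitChar_inj {a b : Nat} (ha : a < 10) (hb : b < 10) :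
    Nat.digitChar a = Nat.digitChar b → a = b := by
  interval_cases a <;> interval_cases b <;> simp_all [Nat.digitChar]

lemma map_digitChar_inj : ∀ {l₁ l₂ : List Nat}, (∀ d ∈ l₁, d < 10) → (∀ d ∈ l₂, d < 10) →
    (l₁.map Nat.digitChar = l₂.map Nat.digitChar ↔ l₁ = l₂) := by
  intro l₁
  induction l₁ with
  | nil => intro l₂ _ _; cases l₂ <;> simp
  | cons a r ih =>
    intro l₂ h₁ h₂
    cases l₂ with
    | nil => simp
    | cons b r₂ =>
      simp only [List.map_cons, List.cons.injEq]
      constructor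
      · rintro ⟨hab, hr⟩
        exact ⟨digitChar_inj (h₁ a (by simp)) (h₂ b (by simp)) hab,
          (ih (fun d hd => h₁ d (by simp [hd])) (fun d hd => h₂ d (by simp [hd]))).mp hr⟩
      · rintro ⟨rfl, rfl⟩; exact ⟨rfl, rfl⟩

lemma digitChar_ne_dash {d : Nat} (hd : d < 10) : Nat.digitChar d ≠ '-' := by
  interval_cases d <;> decide

lemma pvLoopA_eq_all (s : List Char) :
    pvLoopA s = s.all (fun c => c == '0' || c == '2' || c == '4' || c == '6' || c == '8') := by
  induction s with
  | nil => rfl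
  | cons c r ih =>
    simp only [pvLoopA, List.all_cons, ih]
    cases h0 : (c == '0') <;> cases h2 : (c == '2') <;> cases h4 : (c == '4') <;>
      cases h6 : (c == '6') <;> cases h8 : (c == '8') <;> simp

lemma evenChar_iff {d : Nat} (hd : d < 10) :
    ((Nat.digitChar d == '0' || Nat.digitChar d == '2' || Nat.digitChar d == '4' ||
      Nat.digitChar d == '6' || Nat.digitChar d == '8') = true) ↔ d % 2 = 0 := by
  interval_cases d <;> decide

lemma mapI_cons (a : Nat) (r : List Nat) : mapI (a :: r) = (a : Int) :: mapI r := rfl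

lemma mapI_reverse (l : List Nat) : mapI l.reverse = (mapI l).reverse := by
  rw [mapI_eq, mapI_eq, List.map_reverse]

lemma mapI_length (l : List Nat) : (mapI l).length = l.length := by
  rw [mapI_eq]; exact List.length_map ..

lemma mapI_inj : ∀ {l₁ l₂ : List Nat}, mapI l₁ = mapI l₂ ↔ l₁ = l₂ := by
  intro l₁
  induction l₁ with
  | nil => intro l₂; cases l₂ <;> simp [mapI]
  | cons a r ih =>
    intro l₂
    cases l₂ with
    | nil => simp [mapI]
    | cons b r₂ =>
      show ((a : Int) :: mapI r = (b : Int) :: mapI r₂) ↔ _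
      rw [List.cons.injEq, List.cons.injEq, Int.natCast_inj, ih]

lemma mapI_all_even (l : List Nat) :
    (mapI l).all (fun d => d % 2 == 0) = l.all (fun d => d % 2 == 0) := by
  induction l with
  | nil => rfl
  | cons a r ih =>
    rw [mapI_cons, List.all_cons, List.all_cons, ih]
    congr 1
    rcases Nat.mod_two_eq_zero_or_one a with h | h
    · have : ((a : Int) % 2) = 0 := by omega
      simp [this, h]
    · have : ((a : Int) % 2) = 1 := by omega
      simp [this, h]

lemma pal_iff (m : Nat) :
    ((Nat.toDigits 10 m).reverse = Nat.toDigits 10 m) ↔ natDigs m = (natDigs m).reverse := by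
  rw [toDigits_eq, List.reverse_reverse, ← List.map_reverse,
    map_digitChar_inj (natDigs_lt10 m) (fun d hd => natDigs_lt10 m d (List.mem_reverse.mp hd))]

lemma palI_iff (l : List Nat) : (mapI l = (mapI l).reverse) ↔ l = l.reverse := by
  rw [← mapI_reverse, mapI_inj]

lemma len_toDigits (m : Nat) : (Nat.toDigits 10 m).length = (natDigs m).length := by
  rw [toDigits_eq]; simp

lemma allA_eq (m : Nat) :
    pvLoopA (Nat.toDigits 10 m) = (mapI (natDigs m)).all (fun d => d % 2 == 0) := by
  rw [pvLoopA_eq_all, toDigits_eq, List.all_reverse, List.all_map, mapI_all_even]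
  apply Bool.eq_iff_iff.mpr
  simp only [List.all_eq_true, Function.comp, beq_iff_eq]
  constructor
  · intro h d hd
    exact (evenChar_iff (natDigs_lt10 m d hd)).mp (by simpa using h d hd)
  · intro h d hd
    simpa using (evenChar_iff (natDigs_lt10 m d hd)).mpr (h d hd)

-- the nonnegative case: both sides reduce to the same three conditions on natDigs m
lemma key (m : Nat) :
    (if (Nat.toDigits 10 m).reverse ≠ Nat.toDigits 10 m then false
     else if (Nat.toDigits 10 m).length % 2 == 1 then false
     else pvLoopA (Nat.toDigits 10 m))
    = (((mapI (natDigs m)).length % 2 == 0) && (mapI (natDigs m) == (mapI (natDigs m)).reverse)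
        && (mapI (natDigs m)).all (fun d => d % 2 == 0)) := by
  by_cases hp : natDigs m = (natDigs m).reverse
  · have h1 : ¬ ((Nat.toDigits 10 m).reverse ≠ Nat.toDigits 10 m) :=
      not_not_intro ((pal_iff m).mpr hp)
    rw [if_neg h1]
    have hpb : (mapI (natDigs m) == (mapI (natDigs m)).reverse) = true := by
      rw [beq_iff_eq]; exact (palI_iff _).mpr hp
    by_cases he : (natDigs m).length % 2 = 0
    · have h2 : ((Nat.toDigits 10 m).length % 2 == 1) = false := by
        rw [len_toDigits, beq_eq_false_iff_ne]; omega
      have h3 : ((mapI (natDigs m)).length % 2 == 0) = true := by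
        rw [mapI_length]; simp [he]
      rw [h2, h3, hpb, allA_eq]
      simp
    · have h2 : ((Nat.toDigits 10 m).length % 2 == 1) = true := by
        rw [len_toDigits]; simp; omega
      have h3 : ((mapI (natDigs m)).length % 2 == 0) = false := by
        rw [mapI_length, beq_eq_false_iff_ne]; omega
      rw [h2, h3]
      simp
  · have h1 : (Nat.toDigits 10 m).reverse ≠ Nat.toDigits 10 m :=
      fun hc => hp ((pal_iff m).mp hc)
    rw [if_pos h1]
    have hpb : (mapI (natDigs m) == (mapI (natDigs m)).reverse) = false := by
      rw [beq_eq_false_iff_ne]; exact fun hc => hp ((palI_iff _).mp hc)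
    rw [hpb]
    simp

-- negative n: str(n) starts with '-' and ends with a digit character, so the reversal test fails
lemma neg_case (n : Int) (hn : n < 0) : isBeautifulNumber n = false := by
  unfold isBeautifulNumber
  simp only [PySem.Int.toChars, if_pos hn, PySem.List.slice?_none_none_neg_one, Option.getD_some]
  set t := Nat.toDigits 10 n.natAbs with ht
  obtain ⟨a, r, hL⟩ := List.exists_cons_of_ne_nil (natDigs_ne_nil n.natAbs)
  have hrev : ('-' :: t).reverse ≠ '-' :: t := by
    intro hc
    have hhead : (('-' :: t).reverse).head? = some (Nat.digitChar a) := by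
      rw [List.reverse_cons, ht, toDigits_eq, List.reverse_reverse, hL]
      simp
    rw [hc] at hhead
    simp only [List.head?_cons, Option.some.injEq] at hhead
    exact digitChar_ne_dash (natDigs_lt10 n.natAbs a (by rw [hL]; simp)) hhead.symm
  rw [if_pos hrev]

-- ===== VERDICT (by name: the statement is the Claim_ definition above) =====
theorem isBeautifulNumber_spec : Claim_equal_isBeautifulNumber := by
  intro n _
  show isBeautifulNumber n = isBeautifulNumber_alt n
  by_cases hn : n < 0
  · rw [neg_case n hn]
    unfold isBeautifulNumber_alt
    rw [if_pos hn]
  · unfold isBeautifulNumber isBeautifulNumber_alt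
    rw [if_neg hn]
    simp only [PySem.Int.toChars, if_neg hn, PySem.List.slice?_none_none_neg_one,
      Option.getD_some, pvDigitsB_eq]
    exact key n.toNat
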